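-- pv_equiv track=rewrite | github.com/YevgenDmytriyev/Homework | 14-07-2023-python-logical-thinking-iii-YevgenDmytriyev/logical3.py | has_hits
-- ===== SOURCE A (Python) =====
-- def has_hits(author_name):
--     for user in users:
--         if user["name"] == author_name:
--             for item in user["items"]:
--                 if "reads" in item and item["reads"] > 1000:
--                     return True
--             break
--     return False
--
-- users = [
--     {
--         "name": "Clark",
--         "type": "Publisher",
--         "items": [
--             {
--                 "title": "The ABC of Blockchain",
--                 "status": "Draft",
--                 "reads": 10
--             }
--         ]
--     },
--     {
--         "name": "Peter",
--         "type": "Publisher",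
--         "items": []
--     },
--     {
--         "name": "Samantha",
--         "type": "Publisher",
--         "items": [
--             {
--                 "title": "The ABC of JavaScript",
--                 "status": "Published",
--                 "reads": 3254
--             },
--             {
--                 "title": "The XYZ of JavaScript",
--                 "status": "Published",
--                 "reads": 226
--             }
--         ]
--     },
--     {
--         "name": "Mathilda",
--         "type": "Reviewer",
--         "items": [
--             {
--                 "title": "The ABC of Blockchain",
--                 "status": "Pending"
--             }
--         ]
--     }
-- ]
-- ===== SOURCE B (Python) =====
-- def has_hits(author_name):
--     return _hits.get(author_name, False)
--
-- def _build_hits():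
--     return {u["name"]: any("reads" in it and it["reads"] > 1000 for it in u["items"])
--             for u in users}
--
-- users = [
--     {"name": "Clark", "type": "Publisher",
--      "items": [{"title": "The ABC of Blockchain", "status": "Draft", "reads": 10}]},
--     {"name": "Peter", "type": "Publisher", "items": []},
--     {"name": "Samantha", "type": "Publisher",
--      "items": [{"title": "The ABC of JavaScript", "status": "Published", "reads": 3254},
--                {"title": "The XYZ of JavaScript", "status": "Published", "reads": 226}]},
--     {"name": "Mathilda", "type": "Reviewer",
--      "items": [{"title": "The ABC of Blockchain", "status": "Pending"}]},
-- ]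
--
-- _hits = _build_hits()
-- ===== Notes on version B (the rewrite author's own statement) =====
-- stated objective: alternative
-- what changed: Replaces the scan-until-match loop with an inner per-user scan by a module-level dict built once over all users mapping name to its any()-hit status, so the call is a single lookup with default False.
import Mathlib
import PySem

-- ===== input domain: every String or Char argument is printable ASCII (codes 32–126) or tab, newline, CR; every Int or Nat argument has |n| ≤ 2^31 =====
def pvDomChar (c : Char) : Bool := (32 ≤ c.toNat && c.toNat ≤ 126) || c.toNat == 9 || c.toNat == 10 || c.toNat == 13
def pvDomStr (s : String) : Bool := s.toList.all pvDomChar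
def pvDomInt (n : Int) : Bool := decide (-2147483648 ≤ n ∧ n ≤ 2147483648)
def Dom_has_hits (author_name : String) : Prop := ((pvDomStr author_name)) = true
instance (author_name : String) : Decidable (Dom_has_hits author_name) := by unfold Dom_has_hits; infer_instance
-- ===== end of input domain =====

-- B replaces A's scan-until-match loop (with its inner item scan) by a dict of hit-statuses
-- built once over all users, then a single lookup with default false.

-- The fixed module-level data: each user is (name, items); an item is modelled by its
-- optional "reads" field (some r iff the Python item dict has key "reads", value r) —
-- exact for the only fields either program reads.
def pvUsers : List (String × List (Option Int)) :=
  [("Clark", [some 10]),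
   ("Peter", []),
   ("Samantha", [some 3254, some 226]),
   ("Mathilda", [none])]

-- ===== PORT A =====
-- inner 'for item in user["items"]: if "reads" in item and item["reads"] > 1000: return True'
def pvItemScan : List (Option Int) → Bool
  | [] => false
  | o :: rest =>
    match o with
    | some r => if r > 1000 then true else pvItemScan rest
    | none => pvItemScan rest

-- outer 'for user in users: if user["name"] == author_name: …; break'
def pvUserScan : List (String × List (Option Int)) → String → Bool
  | [], _ => false
  | (n, items) :: rest, a => if n == a then pvItemScan items else pvUserScan rest a

def has_hits (author_name : String) : Bool := pvUserScan pvUsers author_name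

-- ===== PORT B =====
-- dict comprehension {u["name"]: any("reads" in it and it["reads"] > 1000 for it in u["items"]) for u in users}
def pvHits : PySem.Dict String Bool :=
  pvUsers.foldl
    (fun d u => d.insert u.1 (u.2.any (fun o => match o with | some r => decide (r > 1000) | none => false)))
    PySem.Dict.empty

def has_hits_alt (author_name : String) : Bool := pvHits.getD author_name false

-- ===== PRECONDITION & SPEC =====
def Spec_has_hits (author_name : String) (out : Bool) : Prop := out = has_hits_alt author_name
instance (author_name : String) (out : Bool) : Decidable (Spec_has_hits author_name out) := by unfold Spec_has_hits; infer_instance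

-- ===== CLAIM (what is proved, stated in full; the proofs are below) =====
def Claim_equal_has_hits : Prop := ∀ (author_name : String), Dom_has_hits author_name → Spec_has_hits author_name (has_hits author_name)

-- ===== LEMMAS AND PROOFS =====
theorem pvHits_items :
    pvHits = PySem.Dict.mk [("Clark", false), ("Peter", false), ("Samantha", true), ("Mathilda", false)] := by
  decide

-- ===== VERDICT (by name: the statement is the Claim_ definition above) =====
theorem has_hits_spec : Claim_equal_has_hits := by
  intro a _
  unfold Spec_has_hits has_hits has_hits_alt
  rw [pvHits_items]
  simp [pvUsers, pvUserScan, pvItemScan, PySem.Dict.getD, PySem.Dict.get?_mk_cons]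
  by_cases h1 : ("Clark" : String) == a <;> by_cases h2 : ("Peter" : String) == a <;>
  by_cases h3 : ("Samantha" : String) == a <;> by_cases h4 : ("Mathilda" : String) == a <;>
  simp_all [PySem.Dict.get?]
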